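-- pv_equiv track=rewrite | github.com/ai-village-agents/village-time-capsule | generate_project_hub.py | categorize_repo
-- ===== SOURCE A (Python) =====
-- def categorize_repo(name, description):
--     """Categorize repository based on name and description."""
--     name_lower = name.lower()
--     desc_lower = (description or "").lower()
--
--     # Park cleanup ecosystem
--     if any(keyword in name_lower or keyword in desc_lower for keyword in
--            ["cleanup", "park", "community action", "toolkit"]):
--         return "Park Cleanup Ecosystem"
--
--     # News/Wire repositories
--     if any(keyword in name_lower or keyword in desc_lower for keyword in
--            ["news", "wire", "monitor", "breaking"]):
--         return "Breaking News Competition"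
--
--     # Juice Shop security
--     if "juice" in name_lower or "owasp" in name_lower:
--         return "Security & Juice Shop"
--
--     # Time Capsule and documentation
--     if any(keyword in name_lower or keyword in desc_lower for keyword in
--            ["time-capsule", "contribution-dashboard", "dashboard", "archive"]):
--         return "Historical Archives & Documentation"
--
--     # Personality quiz
--     if "which-ai" in name_lower or "quiz" in desc_lower:
--         return "Personality Quiz Project"
--
--     # Tools and infrastructure
--     if any(keyword in name_lower or keyword in desc_lower for keyword in
--            ["open-ics", "civic", "safety", "guardrails", "repo-health"]):
--         return "Tools & Infrastructure"
--
--     return "Other Projects"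
-- ===== SOURCE B (Python) =====
-- # Flat keyword index + min-priority selection instead of an ordered if-cascade.
-- _CATEGORIES = [
--     "Park Cleanup Ecosystem",
--     "Breaking News Competition",
--     "Security & Juice Shop",
--     "Historical Archives & Documentation",
--     "Personality Quiz Project",
--     "Tools & Infrastructure",
-- ]
--
-- # keyword -> (priority, scope); scope: 0 = name+description, 1 = name only, 2 = description only.
-- # No keyword contains "\n", so searching name_lower + "\n" + desc_lower is exactly
-- # "in name_lower or in desc_lower" (a keyword can never span the separator).
-- _KEYWORDS = {
--     "cleanup": (0, 0), "park": (0, 0), "community action": (0, 0), "toolkit": (0, 0),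
--     "news": (1, 0), "wire": (1, 0), "monitor": (1, 0), "breaking": (1, 0),
--     "juice": (2, 1), "owasp": (2, 1),
--     "time-capsule": (3, 0), "contribution-dashboard": (3, 0), "dashboard": (3, 0), "archive": (3, 0),
--     "which-ai": (4, 1), "quiz": (4, 2),
--     "open-ics": (5, 0), "civic": (5, 0), "safety": (5, 0), "guardrails": (5, 0), "repo-health": (5, 0),
-- }
--
--
-- def categorize_repo(name, description):
--     """Categorize repository based on name and description."""
--     name_lower = name.lower()
--     desc_lower = (description or "").lower()
--     haystacks = (name_lower + "\n" + desc_lower, name_lower, desc_lower)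
--     best = min((prio for kw, (prio, scope) in _KEYWORDS.items() if kw in haystacks[scope]),
--                default=len(_CATEGORIES))
--     return (_CATEGORIES + ["Other Projects"])[best]
-- ===== Notes on version B (the rewrite author's own statement) =====
-- stated objective: alternative
-- what changed: Replaces the ordered if-cascade of per-category checks with a flat keyword->(priority,scope) index scanned once: both-scope keywords are searched in name+'\n'+description (keywords contain no newline, so no match can span the separator) and the result is the category of the minimum matching priority, with no early-exit cascade.
import Mathlib
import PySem

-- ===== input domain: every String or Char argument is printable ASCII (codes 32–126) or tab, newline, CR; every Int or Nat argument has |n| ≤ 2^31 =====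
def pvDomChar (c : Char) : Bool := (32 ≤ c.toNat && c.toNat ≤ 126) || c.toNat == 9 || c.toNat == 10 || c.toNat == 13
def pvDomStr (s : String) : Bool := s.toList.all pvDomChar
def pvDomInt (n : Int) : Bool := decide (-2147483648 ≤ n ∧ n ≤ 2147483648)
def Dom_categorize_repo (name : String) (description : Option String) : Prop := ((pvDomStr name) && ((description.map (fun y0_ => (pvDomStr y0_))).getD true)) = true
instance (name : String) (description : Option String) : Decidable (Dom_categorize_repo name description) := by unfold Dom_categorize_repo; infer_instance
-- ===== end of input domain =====

-- B replaces the if-cascade by a flat keyword->(priority,scope) index: one min-priority scan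
-- over all keywords, searching both-scope keywords in name ++ "\n" ++ description (alternative; same cost).


-- ===== PORT A =====
def categorize_repo (name : String) (description : Option String) : String :=
  let name_lower := PySem.Str.lower name
  let desc_lower := PySem.Str.lower ((description).getD "")
  if (["cleanup", "park", "community action", "toolkit"].any
        (fun keyword => PySem.Str.isIn keyword name_lower || PySem.Str.isIn keyword desc_lower)) then
    "Park Cleanup Ecosystem"
  else if (["news", "wire", "monitor", "breaking"].any
        (fun keyword => PySem.Str.isIn keyword name_lower || PySem.Str.isIn keyword desc_lower)) then
    "Breaking News Competition"
  else if PySem.Str.isIn "juice" name_lower || PySem.Str.isIn "owasp" name_lower then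
    "Security & Juice Shop"
  else if (["time-capsule", "contribution-dashboard", "dashboard", "archive"].any
        (fun keyword => PySem.Str.isIn keyword name_lower || PySem.Str.isIn keyword desc_lower)) then
    "Historical Archives & Documentation"
  else if PySem.Str.isIn "which-ai" name_lower || PySem.Str.isIn "quiz" desc_lower then
    "Personality Quiz Project"
  else if (["open-ics", "civic", "safety", "guardrails", "repo-health"].any
        (fun keyword => PySem.Str.isIn keyword name_lower || PySem.Str.isIn keyword desc_lower)) then
    "Tools & Infrastructure"
  else
    "Other Projects"

-- ===== PORT B =====
def pvCats : List String :=
  ["Park Cleanup Ecosystem", "Breaking News Competition", "Security & Juice Shop",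
   "Historical Archives & Documentation", "Personality Quiz Project", "Tools & Infrastructure"]

-- keyword -> (priority, scope); scope: 0 = name+description, 1 = name only, 2 = description only
def pvKw : List (String × Nat × Nat) :=
  [("cleanup", 0, 0), ("park", 0, 0), ("community action", 0, 0), ("toolkit", 0, 0),
   ("news", 1, 0), ("wire", 1, 0), ("monitor", 1, 0), ("breaking", 1, 0),
   ("juice", 2, 1), ("owasp", 2, 1),
   ("time-capsule", 3, 0), ("contribution-dashboard", 3, 0), ("dashboard", 3, 0), ("archive", 3, 0),
   ("which-ai", 4, 1), ("quiz", 4, 2),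
   ("open-ics", 5, 0), ("civic", 5, 0), ("safety", 5, 0), ("guardrails", 5, 0), ("repo-health", 5, 0)]

-- haystacks[scope]; tuple indexing ported as an if-chain, exact since every scope in pvKw is 0, 1 or 2
def pvHay (nl dl : String) (scope : Nat) : String :=
  if scope = 1 then nl else if scope = 2 then dl else nl ++ "\n" ++ dl

-- one step of Python's min(...) over the matching-keyword generator
def pvStep (nl dl : String) (acc : Nat) (e : String × Nat × Nat) : Nat :=
  if PySem.Str.isIn e.1 (pvHay nl dl e.2.2) then min acc e.2.1 else acc

def categorize_repo_alt (name : String) (description : Option String) : String :=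
  let name_lower := PySem.Str.lower name
  let desc_lower := PySem.Str.lower ((description).getD "")
  let best := pvKw.foldl (pvStep name_lower desc_lower) pvCats.length
  -- best ≤ pvCats.length always, so the index is in range and the .getD default is never used
  (PySem.List.pyGet? (pvCats ++ ["Other Projects"]) (best : Int)).getD ""

-- ===== PRECONDITION & SPEC =====
def Spec_categorize_repo (name : String) (description : Option String) (out : String) : Prop := out = categorize_repo_alt name description
instance (name : String) (description : Option String) (out : String) : Decidable (Spec_categorize_repo name description out) := by unfold Spec_categorize_repo; infer_instance

-- ===== CLAIM (what is proved, stated in full; the proofs are below) =====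
def Claim_equal_categorize_repo : Prop := ∀ (name : String) (description : Option String), Dom_categorize_repo name description → Spec_categorize_repo name description (categorize_repo name description)

-- ===== LEMMAS AND PROOFS =====

-- a prefix of a ++ c :: b that avoids c is a prefix of a
theorem pv_prefix_append_sep {k a b : List Char} {c : Char} (hc : c ∉ k) :
    k <+: a ++ c :: b ↔ k <+: a := by
  constructor
  · intro h
    have hlen : k.length ≤ a.length := by
      by_contra hgt
      have hk : a.length < k.length := Nat.lt_of_not_le hgt
      have h1 := List.IsPrefix.getElem h (i := a.length) hk
      have hr : (a ++ c :: b)[a.length]'(by simp) = c := by simp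
      exact hc ((h1.trans hr) ▸ List.getElem_mem hk)
    have h2 := List.prefix_iff_eq_take.mp h
    rw [List.take_append_of_le_length hlen] at h2
    exact h2 ▸ List.take_prefix _ _
  · intro h
    exact h.trans (List.prefix_append _ _)

-- an infix of a ++ c :: b that avoids c is an infix of a or of b
theorem pv_infix_append_sep {k : List Char} (a : List Char) {b : List Char} {c : Char} (hc : c ∉ k) :
    k <:+: a ++ c :: b ↔ k <:+: a ∨ k <:+: b := by
  induction a with
  | nil =>
    rw [List.nil_append, List.infix_cons_iff,
      show (c :: b) = ([] : List Char) ++ c :: b from rfl, pv_prefix_append_sep hc]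
    simp
  | cons x a' ih =>
    rw [show (x :: a') ++ c :: b = x :: (a' ++ c :: b) from rfl, List.infix_cons_iff, ih,
      List.infix_cons_iff (l₂ := a'),
      show x :: (a' ++ c :: b) = (x :: a') ++ c :: b from rfl, pv_prefix_append_sep hc]
    tauto

-- searching the newline-joined haystack = searching name or description, for newline-free keywords
theorem pv_join_chars (k a b : List Char) (hc : '\n' ∉ k) :
    PySem.Chars.isIn k (a ++ ("\n".toList ++ b)) = (PySem.Chars.isIn k a || PySem.Chars.isIn k b) := by
  rw [Bool.eq_iff_iff]
  simp only [Bool.or_eq_true, PySem.Chars.isIn_iff_infix]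
  rw [show ("\n".toList ++ b) = '\n' :: b from rfl]
  exact pv_infix_append_sep a hc

-- fold freeze: once the accumulator is ≤ every remaining priority, it never changes
theorem pv_fold_freeze (nl dl : String) (l : List (String × Nat × Nat)) (acc : Nat)
    (h : ∀ e ∈ l, acc ≤ e.2.1) : l.foldl (pvStep nl dl) acc = acc := by
  induction l with
  | nil => rfl
  | cons e t ih =>
    have he : pvStep nl dl acc e = acc := by
      unfold pvStep
      split_ifs with hm
      · exact Nat.min_eq_left (h e (by simp))
      · rfl
    rw [List.foldl_cons, he]
    exact ih (fun x hx => h x (by simp [hx]))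

-- fold over a uniform-priority group: result is the group priority iff any keyword matches
theorem pv_fold_group (nl dl : String) (i : Nat) (l : List (String × Nat × Nat)) (acc : Nat)
    (hp : ∀ e ∈ l, e.2.1 = i) (hi : i ≤ acc) :
    l.foldl (pvStep nl dl) acc =
      if l.any (fun e => PySem.Str.isIn e.1 (pvHay nl dl e.2.2)) then i else acc := by
  induction l generalizing acc with
  | nil => simp
  | cons e t ih =>
    rw [List.foldl_cons]
    by_cases hm : PySem.Str.isIn e.1 (pvHay nl dl e.2.2)
    · have : pvStep nl dl acc e = i := by
        unfold pvStep
        rw [if_pos hm, hp e (by simp), Nat.min_eq_right hi]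
      rw [this, ih i (fun x hx => hp x (by simp [hx])) (le_refl i), List.any_cons, hm,
        Bool.true_or, if_pos rfl]
      split <;> rfl
    · have : pvStep nl dl acc e = acc := by
        unfold pvStep
        rw [if_neg hm]
      rw [this, ih acc (fun x hx => hp x (by simp [hx])) hi, List.any_cons,
        Bool.of_not_eq_true hm, Bool.false_or]

-- group decomposition of pvKw (priority 0..5)
def pvG0 : List (String × Nat × Nat) :=
  [("cleanup", 0, 0), ("park", 0, 0), ("community action", 0, 0), ("toolkit", 0, 0)]
def pvG1 : List (String × Nat × Nat) :=
  [("news", 1, 0), ("wire", 1, 0), ("monitor", 1, 0), ("breaking", 1, 0)]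
def pvG2 : List (String × Nat × Nat) := [("juice", 2, 1), ("owasp", 2, 1)]
def pvG3 : List (String × Nat × Nat) :=
  [("time-capsule", 3, 0), ("contribution-dashboard", 3, 0), ("dashboard", 3, 0), ("archive", 3, 0)]
def pvG4 : List (String × Nat × Nat) := [("which-ai", 4, 1), ("quiz", 4, 2)]
def pvG5 : List (String × Nat × Nat) :=
  [("open-ics", 5, 0), ("civic", 5, 0), ("safety", 5, 0), ("guardrails", 5, 0), ("repo-health", 5, 0)]

theorem pvKw_eq : pvKw = pvG0 ++ (pvG1 ++ (pvG2 ++ (pvG3 ++ (pvG4 ++ pvG5)))) := rfl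

-- each group's combined-haystack match equals the corresponding condition of A
theorem pv_any0 (nl dl : String) :
    (pvG0.any fun e => PySem.Str.isIn e.1 (pvHay nl dl e.2.2)) =
      (["cleanup", "park", "community action", "toolkit"].any
        (fun keyword => PySem.Str.isIn keyword nl || PySem.Str.isIn keyword dl)) := by
  simp only [pvG0, List.any_cons, List.any_nil, pvHay]
  norm_num
  rw [pv_join_chars "cleanup".toList nl.toList dl.toList (by decide), pv_join_chars "park".toList nl.toList dl.toList (by decide),
    pv_join_chars "community action".toList nl.toList dl.toList (by decide), pv_join_chars "toolkit".toList nl.toList dl.toList (by decide)]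

theorem pv_any1 (nl dl : String) :
    (pvG1.any fun e => PySem.Str.isIn e.1 (pvHay nl dl e.2.2)) =
      (["news", "wire", "monitor", "breaking"].any
        (fun keyword => PySem.Str.isIn keyword nl || PySem.Str.isIn keyword dl)) := by
  simp only [pvG1, List.any_cons, List.any_nil, pvHay]
  norm_num
  rw [pv_join_chars "news".toList nl.toList dl.toList (by decide), pv_join_chars "wire".toList nl.toList dl.toList (by decide),
    pv_join_chars "monitor".toList nl.toList dl.toList (by decide), pv_join_chars "breaking".toList nl.toList dl.toList (by decide)]

theorem pv_any2 (nl dl : String) :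
    (pvG2.any fun e => PySem.Str.isIn e.1 (pvHay nl dl e.2.2)) =
      (PySem.Str.isIn "juice" nl || PySem.Str.isIn "owasp" nl) := by
  simp [pvG2, pvHay]

theorem pv_any3 (nl dl : String) :
    (pvG3.any fun e => PySem.Str.isIn e.1 (pvHay nl dl e.2.2)) =
      (["time-capsule", "contribution-dashboard", "dashboard", "archive"].any
        (fun keyword => PySem.Str.isIn keyword nl || PySem.Str.isIn keyword dl)) := by
  simp only [pvG3, List.any_cons, List.any_nil, pvHay]
  norm_num
  rw [pv_join_chars "time-capsule".toList nl.toList dl.toList (by decide), pv_join_chars "contribution-dashboard".toList nl.toList dl.toList (by decide),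
    pv_join_chars "dashboard".toList nl.toList dl.toList (by decide), pv_join_chars "archive".toList nl.toList dl.toList (by decide)]

theorem pv_any4 (nl dl : String) :
    (pvG4.any fun e => PySem.Str.isIn e.1 (pvHay nl dl e.2.2)) =
      (PySem.Str.isIn "which-ai" nl || PySem.Str.isIn "quiz" dl) := by
  simp [pvG4, pvHay]

theorem pv_any5 (nl dl : String) :
    (pvG5.any fun e => PySem.Str.isIn e.1 (pvHay nl dl e.2.2)) =
      (["open-ics", "civic", "safety", "guardrails", "repo-health"].any
        (fun keyword => PySem.Str.isIn keyword nl || PySem.Str.isIn keyword dl)) := by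
  simp only [pvG5, List.any_cons, List.any_nil, pvHay]
  norm_num
  rw [pv_join_chars "open-ics".toList nl.toList dl.toList (by decide), pv_join_chars "civic".toList nl.toList dl.toList (by decide),
    pv_join_chars "safety".toList nl.toList dl.toList (by decide), pv_join_chars "guardrails".toList nl.toList dl.toList (by decide),
    pv_join_chars "repo-health".toList nl.toList dl.toList (by decide)]

-- the min-fold computes the first matching category's priority (A's cascade order)
theorem pv_best (nl dl : String) :
    pvKw.foldl (pvStep nl dl) 6 =
      (if (["cleanup", "park", "community action", "toolkit"].any
            (fun keyword => PySem.Str.isIn keyword nl || PySem.Str.isIn keyword dl)) then 0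
       else if (["news", "wire", "monitor", "breaking"].any
            (fun keyword => PySem.Str.isIn keyword nl || PySem.Str.isIn keyword dl)) then 1
       else if PySem.Str.isIn "juice" nl || PySem.Str.isIn "owasp" nl then 2
       else if (["time-capsule", "contribution-dashboard", "dashboard", "archive"].any
            (fun keyword => PySem.Str.isIn keyword nl || PySem.Str.isIn keyword dl)) then 3
       else if PySem.Str.isIn "which-ai" nl || PySem.Str.isIn "quiz" dl then 4
       else if (["open-ics", "civic", "safety", "guardrails", "repo-health"].any
            (fun keyword => PySem.Str.isIn keyword nl || PySem.Str.isIn keyword dl)) then 5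
       else 6) := by
  have hz : ∀ (l : List (String × Nat × Nat)) (acc : Nat), (∀ e ∈ l, (0 : Nat) ≤ e.2.1) := by
    intro l acc e he; exact Nat.zero_le _
  rw [pvKw_eq]
  simp only [List.foldl_append]
  rw [pv_fold_group nl dl 0 pvG0 6 (by intro e he; fin_cases he <;> rfl) (by omega)]
  rw [← pv_any0 nl dl, ← pv_any1 nl dl, ← pv_any2 nl dl, ← pv_any3 nl dl, ← pv_any4 nl dl,
    ← pv_any5 nl dl]
  by_cases h0 : (pvG0.any fun e => PySem.Str.isIn e.1 (pvHay nl dl e.2.2)) = true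
  · rw [if_pos h0, if_pos h0,
      pv_fold_freeze nl dl pvG1 0 (hz pvG1 0), pv_fold_freeze nl dl pvG2 0 (hz pvG2 0),
      pv_fold_freeze nl dl pvG3 0 (hz pvG3 0), pv_fold_freeze nl dl pvG4 0 (hz pvG4 0),
      pv_fold_freeze nl dl pvG5 0 (hz pvG5 0)]
  · rw [if_neg h0, if_neg h0,
      pv_fold_group nl dl 1 pvG1 6 (by intro e he; fin_cases he <;> rfl) (by omega)]
    by_cases h1 : (pvG1.any fun e => PySem.Str.isIn e.1 (pvHay nl dl e.2.2)) = true
    · rw [if_pos h1, if_pos h1,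
        pv_fold_freeze nl dl pvG2 1 (fun e he => by fin_cases he <;> norm_num),
        pv_fold_freeze nl dl pvG3 1 (fun e he => by fin_cases he <;> norm_num),
        pv_fold_freeze nl dl pvG4 1 (fun e he => by fin_cases he <;> norm_num),
        pv_fold_freeze nl dl pvG5 1 (fun e he => by fin_cases he <;> norm_num)]
    · rw [if_neg h1, if_neg h1,
        pv_fold_group nl dl 2 pvG2 6 (by intro e he; fin_cases he <;> rfl) (by omega)]
      by_cases h2 : (pvG2.any fun e => PySem.Str.isIn e.1 (pvHay nl dl e.2.2)) = true
      · rw [if_pos h2, if_pos h2,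
          pv_fold_freeze nl dl pvG3 2 (fun e he => by fin_cases he <;> norm_num),
          pv_fold_freeze nl dl pvG4 2 (fun e he => by fin_cases he <;> norm_num),
          pv_fold_freeze nl dl pvG5 2 (fun e he => by fin_cases he <;> norm_num)]
      · rw [if_neg h2, if_neg h2,
          pv_fold_group nl dl 3 pvG3 6 (by intro e he; fin_cases he <;> rfl) (by omega)]
        by_cases h3 : (pvG3.any fun e => PySem.Str.isIn e.1 (pvHay nl dl e.2.2)) = true
        · rw [if_pos h3, if_pos h3,
            pv_fold_freeze nl dl pvG4 3 (fun e he => by fin_cases he <;> norm_num),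
            pv_fold_freeze nl dl pvG5 3 (fun e he => by fin_cases he <;> norm_num)]
        · rw [if_neg h3, if_neg h3,
            pv_fold_group nl dl 4 pvG4 6 (by intro e he; fin_cases he <;> rfl) (by omega)]
          by_cases h4 : (pvG4.any fun e => PySem.Str.isIn e.1 (pvHay nl dl e.2.2)) = true
          · rw [if_pos h4, if_pos h4,
              pv_fold_freeze nl dl pvG5 4 (fun e he => by fin_cases he <;> norm_num)]
          · rw [if_neg h4, if_neg h4,
              pv_fold_group nl dl 5 pvG5 6 (by intro e he; fin_cases he <;> rfl) (by omega)]

-- ===== VERDICT (by name: the statement is the Claim_ definition above) =====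
theorem categorize_repo_spec : Claim_equal_categorize_repo := by
  intro name description _
  unfold Spec_categorize_repo categorize_repo categorize_repo_alt
  dsimp only
  rw [show pvCats.length = 6 from rfl, pv_best (PySem.Str.lower name)
    (PySem.Str.lower ((description).getD ""))]
  split_ifs <;> rfl
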